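-- pv_equiv track=rewrite | github.com/khasbin/Python-logical-console-programs | Quadruple.py | shifting
-- ===== SOURCE A (Python) =====
-- def shifting(inp):
--     newlist = list(inp)
--     for i,j in enumerate(newlist):
--         if (i+1)%4 == 0:
--             temp1 =  newlist[i-2]
--             temp2 = newlist[i-3]
--             newlist[i-2] = newlist[i]
--             newlist[i-3] = newlist[i-1]
--             newlist[i-1] = temp2
--             newlist[i]   = temp1
--
--     return newlist
-- ===== SOURCE B (Python) =====
-- def shifting(inp):
--     lst = list(inp)
--     out = []
--     i = 0
--     while i + 4 <= len(lst):
--         out += lst[i+2:i+4] + lst[i:i+2]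
--         i += 4
--     return out + lst[i:]
-- ===== Notes on version B (the rewrite author's own statement) =====
-- stated objective: simpler
-- what changed: Replaces the in-place index-arithmetic swap loop with a short recursion that rebuilds the list chunk by chunk, emitting each four-element group's second half before its first and leaving the tail unchanged.
import Mathlib
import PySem

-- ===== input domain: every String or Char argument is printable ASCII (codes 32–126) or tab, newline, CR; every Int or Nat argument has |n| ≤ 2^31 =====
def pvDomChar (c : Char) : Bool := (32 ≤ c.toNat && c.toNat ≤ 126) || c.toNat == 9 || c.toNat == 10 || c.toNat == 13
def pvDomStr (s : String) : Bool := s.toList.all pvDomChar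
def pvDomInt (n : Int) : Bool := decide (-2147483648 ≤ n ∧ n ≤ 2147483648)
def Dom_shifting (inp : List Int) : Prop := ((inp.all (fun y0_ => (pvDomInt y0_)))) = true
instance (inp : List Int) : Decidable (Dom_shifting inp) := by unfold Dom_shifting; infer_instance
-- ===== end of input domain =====

-- B builds a fresh output by striding over the input in chunks of four and appending each
-- chunk's second half before its first, instead of A's in-place index-arithmetic swaps
-- (objective: simpler). A mutates only a local copy of the input, so there is no observable
-- side effect to mirror.

-- ===== PORT A =====
-- one iteration of A's for-loop body at index i (the unused enumerate value j is dropped)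
def shiftingStep (l : List Int) (i : Nat) : List Int :=
  if (i + 1) % 4 == 0 then
    let temp1 := l.getD (i - 2) 0
    let temp2 := l.getD (i - 3) 0
    let l1 := l.set (i - 2) (l.getD i 0)
    let l2 := l1.set (i - 3) (l1.getD (i - 1) 0)
    let l3 := l2.set (i - 1) temp2
    l3.set i temp1
  else l

def shifting (inp : List Int) : List Int :=
  (List.range inp.length).foldl shiftingStep inp

-- ===== PORT B =====
-- B's while loop; i stays ≥ 0 in the Python, so it is carried as a Nat
def shiftingAltLoop (lst : List Int) (out : List Int) (i : Nat) : List Int :=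
  if i + 4 ≤ lst.length then
    shiftingAltLoop lst
      (out ++ (PySem.List.slice lst (some ((i : Int) + 2)) (some ((i : Int) + 4))
               ++ PySem.List.slice lst (some (i : Int)) (some ((i : Int) + 2))))
      (i + 4)
  else out ++ PySem.List.slice lst (some (i : Int)) none
termination_by lst.length - i

def shifting_alt (inp : List Int) : List Int :=
  shiftingAltLoop inp [] 0

-- ===== PRECONDITION & SPEC =====
def Spec_shifting (inp : List Int) (out : List Int) : Prop := out = shifting_alt inp
instance (inp : List Int) (out : List Int) : Decidable (Spec_shifting inp out) := by unfold Spec_shifting; infer_instance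

-- ===== CLAIM (what is proved, stated in full; the proofs are below) =====
def Claim_equal_shifting : Prop := ∀ (inp : List Int), Dom_shifting inp → Spec_shifting inp (shifting inp)

-- ===== LEMMAS AND PROOFS =====

-- the common specification: swap the halves of each complete group of four
def chunk : List Int → List Int
  | a :: b :: c :: d :: t => c :: d :: a :: b :: chunk t
  | t => t

-- ---- A side ----
lemma shiftingStep_cons4 (c1 c2 c3 c4 : Int) (t : List Int) (i : Nat) :
    shiftingStep (c1 :: c2 :: c3 :: c4 :: t) (4 + i) = c1 :: c2 :: c3 :: c4 :: shiftingStep t i := by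
  unfold shiftingStep
  by_cases h : (i + 1) % 4 = 0
  · have h4 : (4 + i + 1) % 4 = 0 := by omega
    obtain ⟨k, hk⟩ : ∃ k, i = k + 3 := ⟨i - 3, by omega⟩
    subst hk
    simp only [h, h4, beq_self_eq_true, if_true]
    show _ = c1 :: c2 :: c3 :: c4 ::
      ((((t.set (k + 1) (t.getD (k + 3) 0)).set k
        ((t.set (k + 1) (t.getD (k + 3) 0)).getD (k + 2) 0)).set (k + 2) (t.getD k 0)).set (k + 3)
        (t.getD (k + 1) 0))
    have e1 : 4 + (k + 3) - 2 = (k + 1) + 4 := by omega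
    have e2 : 4 + (k + 3) - 3 = k + 4 := by omega
    have e3 : 4 + (k + 3) - 1 = (k + 2) + 4 := by omega
    have e4 : 4 + (k + 3) = (k + 3) + 4 := by omega
    rw [e1, e2, e3, e4]
    rfl
  · have h4 : ¬ ((4 + i + 1) % 4 = 0) := by omega
    simp [h, h4]

lemma foldl_step_shift (xs : List Nat) (c1 c2 c3 c4 : Int) (t : List Int) :
    (xs.map (4 + ·)).foldl shiftingStep (c1 :: c2 :: c3 :: c4 :: t)
      = c1 :: c2 :: c3 :: c4 :: xs.foldl shiftingStep t := by
  induction xs generalizing c1 c2 c3 c4 t with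
  | nil => rfl
  | cons x xs ih => simp only [List.map_cons, List.foldl_cons, shiftingStep_cons4, ih]

lemma shifting_cons4 (a b c d : Int) (t : List Int) :
    shifting (a :: b :: c :: d :: t) = c :: d :: a :: b :: shifting t := by
  unfold shifting
  have hl : (a :: b :: c :: d :: t).length = 4 + t.length := by simp; omega
  rw [hl, List.range_add, List.foldl_append]
  have h4 : (List.range 4).foldl shiftingStep (a :: b :: c :: d :: t) = c :: d :: a :: b :: t := by
    rfl
  rw [h4]
  simpa using foldl_step_shift (List.range t.length) c d a b t

lemma shifting_eq_chunk (inp : List Int) : shifting inp = chunk inp := by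
  have key : ∀ n (l : List Int), l.length ≤ n → shifting l = chunk l := by
    intro n
    induction n with
    | zero =>
      intro l h
      have : l = [] := by cases l <;> simp_all
      subst this; rfl
    | succ n ih =>
      intro l h
      match l with
      | [] => rfl
      | [a] => rfl
      | [a, b] => rfl
      | [a, b, c] => rfl
      | a :: b :: c :: d :: t =>
        rw [shifting_cons4, chunk, ih t (by simp at h ⊢; omega)]
  exact key inp.length inp le_rfl

-- ---- B side ----
lemma chunk_short (t : List Int) (h : t.length < 4) : chunk t = t := by
  match t, h with
  | [], _ => rfl
  | [a], _ => rfl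
  | [a, b], _ => rfl
  | [a, b, c], _ => rfl

lemma shiftingAltLoop_eq (lst : List Int) :
    ∀ k i out, lst.length - i ≤ k → shiftingAltLoop lst out i = out ++ chunk (lst.drop i) := by
  intro k
  induction k with
  | zero =>
    intro i out h
    rw [shiftingAltLoop]
    have hle : ¬ (i + 4 ≤ lst.length) := by omega
    rw [if_neg hle, PySem.List.slice_from_natCast,
        chunk_short _ (by simp [List.length_drop]; omega)]
  | succ k ih =>
    intro i out h
    rw [shiftingAltLoop]
    by_cases hle : i + 4 ≤ lst.length
    · rw [if_pos hle]
      obtain ⟨a, b, c, d, t, hd⟩ :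
          ∃ a b c d t, lst.drop i = a :: b :: c :: d :: t := by
        have h4 : 4 ≤ (lst.drop i).length := by simp [List.length_drop]; omega
        match hdrop : lst.drop i, h4 with
        | a :: b :: c :: d :: t, _ => exact ⟨a, b, c, d, t, rfl⟩
      have hs1 : PySem.List.slice lst (some ((i : Int) + 2)) (some ((i : Int) + 4))
          = [c, d] := by
        have : PySem.List.slice lst (some (((i + 2 : Nat) : Int))) (some (((i + 4 : Nat) : Int)))
            = (lst.drop (i + 2)).take (i + 4 - (i + 2)) := PySem.List.slice_natCast ..
        simp only [Nat.cast_add, Nat.cast_ofNat] at this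
        rw [this]
        have : lst.drop (i + 2) = ((lst.drop i).drop 2) := by
          rw [List.drop_drop]
        rw [this, hd]
        simp
      have hs2 : PySem.List.slice lst (some (i : Int)) (some ((i : Int) + 2)) = [a, b] := by
        have : PySem.List.slice lst (some ((i : Nat) : Int)) (some (((i + 2 : Nat) : Int)))
            = (lst.drop i).take (i + 2 - i) := PySem.List.slice_natCast ..
        simp only [Nat.cast_add, Nat.cast_ofNat] at this
        rw [this, hd]
        simp
      have hdt : lst.drop (i + 4) = t := by
        have : lst.drop (i + 4) = ((lst.drop i).drop 4) := by
          rw [List.drop_drop]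
        rw [this, hd]; rfl
      rw [hs1, hs2, ih (i + 4) _ (by omega), hdt, hd, chunk]
      simp
    · rw [if_neg hle, PySem.List.slice_from_natCast,
          chunk_short _ (by simp [List.length_drop]; omega)]

lemma shifting_alt_eq_chunk (inp : List Int) : shifting_alt inp = chunk inp := by
  unfold shifting_alt
  rw [shiftingAltLoop_eq inp inp.length 0 [] (by omega)]
  simp

-- ===== VERDICT (by name: the statement is the Claim_ definition above) =====
theorem shifting_spec : Claim_equal_shifting := by
  intro inp _
  unfold Spec_shifting
  rw [shifting_eq_chunk, shifting_alt_eq_chunk]
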